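-- pv_equiv track=rewrite | github.com/Tofuu88/Dennis-Chen-Practice | Text_generator_Trigram_BiGram_12_24_2020.py | Markov_trigram
-- ===== SOURCE A (Python) =====
-- def Markov_trigram(trigram: list, inp: str) -> dict:
--     head_dict = {}
--     head_dict[inp] = {"placeholder": 0}
--
--     for j in range(len(trigram)):
--         head_1_check = trigram[j].split()[0]
--         head_2_check = trigram[j].split()[1]
--         tail_check = trigram[j].split()[2]
--         head_check = head_1_check + " " + head_2_check
--         if head_check == inp:
--             if tail_check not in head_dict[head_check]:
--                 head_dict[head_check][tail_check] = 1
--             elif tail_check in head_dict[head_check]: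
--                 head_dict[head_check][tail_check] += 1
--     del head_dict[inp]["placeholder"]
--     return head_dict
-- ===== SOURCE B (Python) =====
-- def Markov_trigram(trigram: list, inp: str) -> dict:
--     # One pass grouping: build third-word counts for EVERY two-word head,
--     # then look up the requested head at the end.
--     table = {}
--     for element in trigram:
--         parts = element.split()
--         head = parts[0] + " " + parts[1]
--         tail = parts[2]
--         counts = table.get(head, {})
--         counts[tail] = counts.get(tail, 0) + 1
--         table[head] = counts
--     return {inp: table.get(inp, {})}
-- ===== Notes on version B (the rewrite author's own statement) =====
-- stated objective: simpler
-- what changed: B replaces A's head-filtered loop with its sentinel 'placeholder' entry and two-branch counting by one unconditional grouping pass that builds tail counts for every two-word head, then looks the requested head up once at the end.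
-- intended difference: On inputs containing a trigram whose two-word head equals inp and whose third word is literally 'placeholder', A's sentinel deletion silently drops those counts (e.g. {'a b': {}}), while B returns the intended count ({'a b': {'placeholder': 1}}); a tail word spelled 'placeholder' should be counted like any other. — e.g. on Markov_trigram(["a b placeholder"], "a b"): A returns [("a b", [])], B returns [("a b", [("placeholder", 1)])]
import Mathlib
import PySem

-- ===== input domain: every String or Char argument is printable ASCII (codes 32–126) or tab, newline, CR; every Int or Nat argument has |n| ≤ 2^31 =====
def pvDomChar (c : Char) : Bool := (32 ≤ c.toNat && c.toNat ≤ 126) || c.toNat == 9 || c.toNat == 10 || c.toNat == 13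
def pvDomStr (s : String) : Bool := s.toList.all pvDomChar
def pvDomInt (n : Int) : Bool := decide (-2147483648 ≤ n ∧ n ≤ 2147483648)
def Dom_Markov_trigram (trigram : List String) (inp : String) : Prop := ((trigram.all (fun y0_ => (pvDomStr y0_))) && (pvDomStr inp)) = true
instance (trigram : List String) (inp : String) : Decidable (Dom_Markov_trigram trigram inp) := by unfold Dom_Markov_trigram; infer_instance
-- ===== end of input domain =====

-- B groups tail counts for EVERY two-word head in one dictionary pass and looks the
-- requested head up at the end, instead of filtering on the head inside the loop and
-- juggling a sentinel "placeholder" entry.  Objective: simpler (same cost).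

-- shared input expressions: element.split()[0] + " " + element.split()[1], element.split()[2]
def pvHeadOf (t : String) : String :=
  PySem.List.pyGetD (PySem.Str.split₀ t) 0 "" ++ " " ++ PySem.List.pyGetD (PySem.Str.split₀ t) 1 ""
def pvTailOf (t : String) : String := PySem.List.pyGetD (PySem.Str.split₀ t) 2 ""

-- ===== PORT A =====
-- one loop body of A: filter on head == inp, two-branch counting into head_dict[inp]
def pvStepA (inp : String) (hd : PySem.Dict String (PySem.Dict String Int)) (t : String) :
    PySem.Dict String (PySem.Dict String Int) :=
  let head_check := pvHeadOf t
  let tail_check := pvTailOf t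
  if head_check == inp then
    let counts := hd.getD head_check PySem.Dict.empty
    if !(counts.contains tail_check) then hd.insert head_check (counts.insert tail_check 1)
    else hd.insert head_check (counts.insert tail_check (counts.getD tail_check 0 + 1))
  else hd

-- return of A: del head_dict[inp]["placeholder"]; return head_dict
def pvAFinish (inp : String) (hd : PySem.Dict String (PySem.Dict String Int)) :
    List (String × List (String × Int)) :=
  ((hd.insert inp ((hd.getD inp PySem.Dict.empty).erase "placeholder")).items).map
    (fun p => (p.1, p.2.items))

def Markov_trigram (trigram : List String) (inp : String) : List (String × List (String × Int)) :=
  pvAFinish inp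
    ((PySem.List.pyRange 0 (trigram.length : Int) 1).foldl
      (fun acc j => pvStepA inp acc (PySem.List.pyGetD trigram j ""))
      ((PySem.Dict.empty).insert inp ((PySem.Dict.empty).insert "placeholder" (0 : Int))))

-- ===== PORT B =====
-- counts[tail] = counts.get(tail, 0) + 1
def pvBump (c : PySem.Dict String Int) (tl : String) : PySem.Dict String Int :=
  c.insert tl (c.getD tl 0 + 1)

-- one loop body of B: unconditional grouping by head
def pvStepB (table : PySem.Dict String (PySem.Dict String Int)) (t : String) :
    PySem.Dict String (PySem.Dict String Int) :=
  table.insert (pvHeadOf t) (pvBump (table.getD (pvHeadOf t) PySem.Dict.empty) (pvTailOf t))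

def Markov_trigram_alt (trigram : List String) (inp : String) : List (String × List (String × Int)) :=
  [(inp, ((trigram.foldl pvStepB PySem.Dict.empty).getD inp PySem.Dict.empty).items)]

-- ===== PRECONDITION & SPEC =====
-- Pre_ excludes exactly the inputs where A raises IndexError: an element whose split() has fewer than 3 words.
def Pre_Markov_trigram (trigram : List String) (inp : String) : Prop :=
  ∀ t ∈ trigram, 3 ≤ (PySem.Str.split₀ t).length
instance (trigram : List String) (inp : String) : Decidable (Pre_Markov_trigram trigram inp) := by
  unfold Pre_Markov_trigram; infer_instance
def pvWitness_Markov_trigram : List String × String := (["a b c"], "a b")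

-- On trigrams whose head matches inp and whose third word is literally "placeholder", A's
-- sentinel deletion silently drops those counts ({} at the witness), while B returns the
-- intended count ({"placeholder": 1}); the tail word "placeholder" deserves no special fate.
def D_Markov_trigram (trigram : List String) (inp : String) : Prop :=
  ∃ t ∈ trigram, 3 ≤ (PySem.Str.split₀ t).length ∧ pvHeadOf t = inp ∧ pvTailOf t = "placeholder"
instance (trigram : List String) (inp : String) : Decidable (D_Markov_trigram trigram inp) := by
  unfold D_Markov_trigram; infer_instance

def Spec_Markov_trigram (trigram : List String) (inp : String)
    (out : List (String × List (String × Int))) : Prop :=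
  ¬ D_Markov_trigram trigram inp → out = Markov_trigram_alt trigram inp
instance (trigram : List String) (inp : String) (out : List (String × List (String × Int))) :
    Decidable (Spec_Markov_trigram trigram inp out) := by unfold Spec_Markov_trigram; infer_instance

def pvDiffWitness_Markov_trigram : List String × String := (["a b placeholder"], "a b")
def pvDiffWitnessOut_Markov_trigram :
    (List (String × List (String × Int))) × (List (String × List (String × Int))) :=
  ([("a b", [])], [("a b", [("placeholder", 1)])])

-- ===== CLAIM (what is proved, stated in full; the proofs are below) =====
def Claim_unchanged_Markov_trigram : Prop := ∀ (trigram : List String) (inp : String), Dom_Markov_trigram trigram inp → Pre_Markov_trigram trigram inp → Spec_Markov_trigram trigram inp (Markov_trigram trigram inp)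
def Claim_changed_Markov_trigram : Prop := Dom_Markov_trigram (pvDiffWitness_Markov_trigram.1) (pvDiffWitness_Markov_trigram.2) ∧ Pre_Markov_trigram (pvDiffWitness_Markov_trigram.1) (pvDiffWitness_Markov_trigram.2) ∧ D_Markov_trigram (pvDiffWitness_Markov_trigram.1) (pvDiffWitness_Markov_trigram.2) ∧ Markov_trigram (pvDiffWitness_Markov_trigram.1) (pvDiffWitness_Markov_trigram.2) = pvDiffWitnessOut_Markov_trigram.1 ∧ Markov_trigram_alt (pvDiffWitness_Markov_trigram.1) (pvDiffWitness_Markov_trigram.2) = pvDiffWitnessOut_Markov_trigram.2 ∧ pvDiffWitnessOut_Markov_trigram.1 ≠ pvDiffWitnessOut_Markov_trigram.2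
def Claim_exact_Markov_trigram : Prop := ∀ (trigram : List String) (inp : String), Dom_Markov_trigram trigram inp → Pre_Markov_trigram trigram inp → D_Markov_trigram trigram inp → Markov_trigram trigram inp ≠ Markov_trigram_alt trigram inp

-- ===== LEMMAS AND PROOFS =====

-- the filtered counting fold both programs reduce to
def pvCount (fts : List String) (c : PySem.Dict String Int) : PySem.Dict String Int :=
  fts.foldl (fun c t => pvBump c (pvTailOf t)) c

-- A's loop body is uniformly "bump the count of the tail" when the head matches
theorem pvStepA_eq (inp : String) (hd : PySem.Dict String (PySem.Dict String Int)) (t : String) :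
    pvStepA inp hd t =
      if pvHeadOf t = inp then
        hd.insert inp (pvBump (hd.getD inp PySem.Dict.empty) (pvTailOf t))
      else hd := by
  unfold pvStepA pvBump
  by_cases h : pvHeadOf t = inp
  · subst h
    simp only [beq_self_eq_true, if_pos]
    by_cases hc : ((hd.getD (pvHeadOf t) PySem.Dict.empty).contains (pvTailOf t)) = true
    · simp [hc]
    · simp only [Bool.not_eq_true] at hc
      simp [hc, PySem.Dict.getD_of_not_contains _ _ hc]
  · simp [h, beq_eq_false_iff_ne.mpr h]

-- A's whole loop: the single-key dict {inp: d} evolves by counting the matching tails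
theorem pvFoldA (inp : String) (ts : List String) (d : PySem.Dict String Int) :
    ts.foldl (pvStepA inp) (PySem.Dict.mk [(inp, d)]) =
      PySem.Dict.mk [(inp, pvCount (ts.filter (fun t => pvHeadOf t == inp)) d)] := by
  induction ts generalizing d with
  | nil => simp [pvCount]
  | cons t ts ih =>
    simp only [List.foldl_cons, List.filter_cons, pvStepA_eq]
    by_cases h : pvHeadOf t = inp
    · subst h
      have h1 : (PySem.Dict.mk [(pvHeadOf t, d)]).getD (pvHeadOf t) PySem.Dict.empty = d := by
        simp [PySem.Dict.getD, PySem.Dict.get?]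
      have h2 : ∀ v : PySem.Dict String Int,
          (PySem.Dict.mk [(pvHeadOf t, d)]).insert (pvHeadOf t) v = PySem.Dict.mk [(pvHeadOf t, v)] := by
        intro v; simp [PySem.Dict.insert, PySem.Dict.contains]
      simp only [h1, h2, ih, beq_self_eq_true, if_true, pvCount, List.foldl_cons]
    · simp only [if_neg h, ih, beq_eq_false_iff_ne.mpr h, Bool.false_eq_true, if_false]

-- B's whole loop, seen through the lookup of inp: only matching elements contribute
theorem pvFoldB (inp : String) (ts : List String)
    (table : PySem.Dict String (PySem.Dict String Int)) :
    (ts.foldl pvStepB table).getD inp PySem.Dict.empty =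
      pvCount (ts.filter (fun t => pvHeadOf t == inp)) (table.getD inp PySem.Dict.empty) := by
  induction ts generalizing table with
  | nil => simp [pvCount]
  | cons t ts ih =>
    simp only [List.foldl_cons, List.filter_cons]
    by_cases h : pvHeadOf t = inp
    · subst h
      simp only [beq_self_eq_true, if_pos, pvCount, List.foldl_cons]
      rw [ih]
      simp [pvStepB, PySem.Dict.getD_insert_self, pvCount]
    · rw [ih]
      have : (pvStepB table t).getD inp PySem.Dict.empty = table.getD inp PySem.Dict.empty := by
        simp [pvStepB, PySem.Dict.getD_insert, if_neg (Ne.symm h)]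
      rw [this]
      simp [beq_eq_false_iff_ne.mpr h]

-- if no counted tail is "placeholder", the sentinel entry just rides along in front
theorem pvCount_cons (fts : List String) (h : ∀ t ∈ fts, pvTailOf t ≠ "placeholder")
    (c : PySem.Dict String Int) :
    pvCount fts (PySem.Dict.mk (("placeholder", 0) :: c.items)) =
      PySem.Dict.mk (("placeholder", 0) :: (pvCount fts c).items) := by
  induction fts generalizing c with
  | nil => simp [pvCount]
  | cons t ts ih =>
    have ht : pvTailOf t ≠ "placeholder" := h t (by simp)
    have hb : ("placeholder" == pvTailOf t) = false := beq_eq_false_iff_ne.mpr (Ne.symm ht)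
    have hstep : pvBump (PySem.Dict.mk (("placeholder", 0) :: c.items)) (pvTailOf t) =
        PySem.Dict.mk (("placeholder", 0) :: (pvBump c (pvTailOf t)).items) := by
      simp only [pvBump, PySem.Dict.insert, PySem.Dict.contains, PySem.Dict.getD,
        PySem.Dict.get?, List.any_cons, List.find?, hb, Bool.false_or]
      by_cases hc : c.items.any (fun p => p.1 == pvTailOf t) = true
      · simp [hc]; exact fun h' => absurd h'.symm ht
      · simp only [Bool.not_eq_true] at hc; simp [hc]
    calc pvCount (t :: ts) (PySem.Dict.mk (("placeholder", 0) :: c.items))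
        = pvCount ts (pvBump (PySem.Dict.mk (("placeholder", 0) :: c.items)) (pvTailOf t)) := rfl
      _ = pvCount ts (PySem.Dict.mk (("placeholder", 0) :: (pvBump c (pvTailOf t)).items)) := by rw [hstep]
      _ = PySem.Dict.mk (("placeholder", 0) :: (pvCount ts (pvBump c (pvTailOf t))).items) :=
          ih (fun u hu => h u (by simp [hu])) _
      _ = PySem.Dict.mk (("placeholder", 0) :: (pvCount (t :: ts) c).items) := rfl

-- every key of the counting fold is an initial key or a counted tail
theorem pvCount_keys (fts : List String) (c : PySem.Dict String Int) (k : String)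
    (hk : k ∈ (pvCount fts c).keys) : k ∈ c.keys ∨ ∃ t ∈ fts, pvTailOf t = k := by
  induction fts generalizing c with
  | nil => exact Or.inl hk
  | cons t ts ih =>
    rcases ih (pvBump c (pvTailOf t)) hk with h1 | h1
    · rw [pvBump, PySem.Dict.mem_keys_insert] at h1
      rcases h1 with h1 | h1
      · exact Or.inr ⟨t, by simp, h1.symm⟩
      · exact Or.inl h1
    · rcases h1 with ⟨u, hu, hh⟩; exact Or.inr ⟨u, by simp [hu], hh⟩


-- A reduced to the filtered counting fold (sentinel start, erased at the end)
theorem pvA_eq (trigram : List String) (inp : String) :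
    Markov_trigram trigram inp =
      [(inp, ((pvCount (trigram.filter (fun t => pvHeadOf t == inp))
                (PySem.Dict.mk [("placeholder", 0)])).erase "placeholder").items)] := by
  unfold Markov_trigram pvAFinish
  have h0 : ((PySem.Dict.empty).insert inp ((PySem.Dict.empty).insert "placeholder" (0 : Int))) =
      PySem.Dict.mk [(inp, PySem.Dict.mk [("placeholder", 0)])] := rfl
  rw [PySem.List.foldl_pyRange_zero_pyGetD' trigram "" (pvStepA inp) _, h0, pvFoldA]
  simp [PySem.Dict.getD, PySem.Dict.get?, PySem.Dict.insert, PySem.Dict.contains]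

-- B reduced to the same filtered counting fold, started empty
theorem pvB_eq (trigram : List String) (inp : String) :
    Markov_trigram_alt trigram inp =
      [(inp, (pvCount (trigram.filter (fun t => pvHeadOf t == inp)) PySem.Dict.empty).items)] := by
  unfold Markov_trigram_alt
  rw [pvFoldB, PySem.Dict.getD_empty]


-- keys survive further counting
theorem pvMemKeys_pvCount (fts : List String) (c : PySem.Dict String Int) (k : String)
    (hk : k ∈ c.keys) : k ∈ (pvCount fts c).keys := by
  induction fts generalizing c with
  | nil => exact hk
  | cons t ts ih =>
    refine ih (pvBump c (pvTailOf t)) ?_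
    rw [pvBump, PySem.Dict.mem_keys_insert]; exact Or.inr hk

-- ===== VERDICT (by name: the statement is the Claim_ definition above) =====
set_option maxHeartbeats 1000000 in
theorem Markov_trigram_spec : Claim_unchanged_Markov_trigram := by
  intro trigram inp _ hPre hND
  show Markov_trigram trigram inp = Markov_trigram_alt trigram inp
  rw [pvA_eq, pvB_eq]
  have hNoP : ∀ t ∈ trigram.filter (fun t => pvHeadOf t == inp), pvTailOf t ≠ "placeholder" := by
    intro t htF htp
    have hmem : t ∈ trigram := List.mem_of_mem_filter htF
    have hb : (pvHeadOf t == inp) = true := by simpa using List.of_mem_filter htF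
    exact hND ⟨t, hmem, hPre t hmem, eq_of_beq hb, htp⟩
  have hc : PySem.Dict.mk [("placeholder", (0 : Int))] =
      PySem.Dict.mk (("placeholder", (0 : Int)) :: (PySem.Dict.empty : PySem.Dict String Int).items) := rfl
  rw [hc, pvCount_cons _ hNoP]
  congr 1
  refine Prod.ext rfl ?_
  show (PySem.Dict.erase _ "placeholder").items = _
  simp only [PySem.Dict.erase, List.filter_cons, beq_self_eq_true,
    Bool.not_true, Bool.false_eq_true, if_false]
  refine List.filter_eq_self.mpr ?_
  intro p hp
  have hk : p.1 ∈ (pvCount (trigram.filter (fun t => pvHeadOf t == inp)) PySem.Dict.empty).keys :=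
    PySem.Dict.mem_keys_of_mem_items _ hp
  rcases pvCount_keys _ _ _ hk with h1 | ⟨t, htF, htl⟩
  · simp [PySem.Dict.keys, PySem.Dict.empty] at h1
  · simpa using htl ▸ hNoP t htF

theorem Markov_trigram_changed : Claim_changed_Markov_trigram := by
  unfold Claim_changed_Markov_trigram; decide

set_option maxHeartbeats 1000000 in
theorem Markov_trigram_tight : Claim_exact_Markov_trigram := by
  intro trigram inp _ hPre hD heq
  rw [pvA_eq, pvB_eq] at heq
  simp only [List.cons.injEq, Prod.mk.injEq, and_true, true_and] at heq
  rcases hD with ⟨t, htmem, hlen, hhead, htail⟩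
  have htF : t ∈ trigram.filter (fun t => pvHeadOf t == inp) :=
    List.mem_filter.mpr ⟨htmem, by simp [hhead]⟩
  -- "placeholder" is a key of B's counts
  rcases List.append_of_mem htF with ⟨l1, l2, hsplit⟩
  have hkey : "placeholder" ∈ (pvCount (trigram.filter (fun t => pvHeadOf t == inp))
      (PySem.Dict.empty : PySem.Dict String Int)).keys := by
    rw [hsplit]
    have h1 : pvCount (l1 ++ t :: l2) PySem.Dict.empty =
        pvCount l2 (pvBump (pvCount l1 PySem.Dict.empty) (pvTailOf t)) := by
      simp [pvCount, List.foldl_append]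
    rw [h1]
    have h2 : "placeholder" ∈ (pvBump (pvCount l1 PySem.Dict.empty) (pvTailOf t)).keys := by
      rw [pvBump, PySem.Dict.mem_keys_insert]; exact Or.inl htail.symm
    exact pvMemKeys_pvCount l2 _ _ h2
  rcases List.mem_map.mp hkey with ⟨p, hpmem, hp1⟩
  rw [← heq] at hpmem
  have := List.of_mem_filter hpmem
  rw [hp1] at this
  simp at this
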